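-- pv_equiv track=rewrite | github.com/chlee1252/dailyLeetCode | book/bowlingball.py | solution
-- ===== SOURCE A (Python) =====
-- def solution(N, M, balls):
--    # result = 0
--    # for i in range(N):
--    #    for j in range(i+1, N):
--    #       if balls[i] != balls[j]:
--    #          result += 1
--
--    # return result
--
--    result = 0
--    array = [0] * 11
--
--    for b in balls:
--       array[b] += 1
--
--    for i in range(1, M+1):
--       N -= array[i]
--       result += array[i] * N
--
--    return result
-- ===== SOURCE B (Python) =====
-- def solution(N, M, balls):
--    array = [0] * 11
--    for b in balls:
--       array[b] += 1
--
--    P = sum(array[i] for i in range(1, M + 1))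
--    sq = sum(array[i] * array[i] for i in range(1, M + 1))
--    return (P * P - sq) // 2 + P * (N - P)
-- ===== Notes on version B (the rewrite author's own statement) =====
-- stated objective: alternative
-- what changed: Keeps the same counting loop but replaces A's incremental loop (decrementing a running remainder N while accumulating) by two aggregate sums P and sq over the counts combined in the closed form (P*P - sq)//2 + P*(N - P).
import Mathlib
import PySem

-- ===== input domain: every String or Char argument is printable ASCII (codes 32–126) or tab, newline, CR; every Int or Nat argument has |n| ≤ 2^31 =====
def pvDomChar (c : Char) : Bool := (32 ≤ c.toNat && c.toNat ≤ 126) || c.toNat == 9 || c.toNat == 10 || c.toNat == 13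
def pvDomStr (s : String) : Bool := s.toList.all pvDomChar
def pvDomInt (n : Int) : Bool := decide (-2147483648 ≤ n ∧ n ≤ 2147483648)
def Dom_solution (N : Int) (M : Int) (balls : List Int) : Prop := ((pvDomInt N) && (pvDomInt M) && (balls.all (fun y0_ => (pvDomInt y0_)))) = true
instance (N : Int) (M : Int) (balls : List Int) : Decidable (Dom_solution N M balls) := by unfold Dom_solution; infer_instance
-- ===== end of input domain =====

-- B changes only the second phase: closed-form combination of two aggregate sums
-- instead of A's incremental remainder loop (objective: alternative, same cost).

-- ===== PORT A =====
-- shared first phase: both Pythons fill 'array = [0]*11' with the identical loop 'array[b] += 1'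
def pvCount (balls : List Int) : List Int :=
  balls.foldl (fun arr b => PySem.List.pySetD arr b (PySem.List.pyGetD arr b 0 + 1))
    (List.replicate 11 0)

def solution (N : Int) (M : Int) (balls : List Int) : Int :=
  let array := pvCount balls
  (((PySem.List.pyRange 1 (M + 1) 1).foldl
      (fun (st : Int × Int) i =>
        let n := st.1 - PySem.List.pyGetD array i 0
        (n, st.2 + PySem.List.pyGetD array i 0 * n))
      (N, 0)).2)

-- ===== PORT B =====
def solution_alt (N : Int) (M : Int) (balls : List Int) : Int :=
  let array := pvCount balls
  let P := (PySem.List.pyRange 1 (M + 1) 1).foldl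
      (fun s i => s + PySem.List.pyGetD array i 0) 0
  let sq := (PySem.List.pyRange 1 (M + 1) 1).foldl
      (fun s i => s + PySem.List.pyGetD array i 0 * PySem.List.pyGetD array i 0) 0
  PySem.Int.floordiv (P * P - sq) 2 + P * (N - P)

-- ===== PRECONDITION & SPEC =====
-- Pre_ excludes exactly the inputs where the Python A raises IndexError:
-- a ball outside -11..10 (the counting loop) or M ≥ 11 (the second loop indexes array[i] for i ≤ M).
def Pre_solution (N : Int) (M : Int) (balls : List Int) : Prop :=
  M ≤ 10 ∧ ∀ b ∈ balls, -11 ≤ b ∧ b ≤ 10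
instance (N : Int) (M : Int) (balls : List Int) : Decidable (Pre_solution N M balls) := by
  unfold Pre_solution; infer_instance
def pvWitness_solution : Int × Int × List Int := (5, 3, [1, 2, 2, 3, 0])

def Spec_solution (N : Int) (M : Int) (balls : List Int) (out : Int) : Prop := out = solution_alt N M balls
instance (N : Int) (M : Int) (balls : List Int) (out : Int) : Decidable (Spec_solution N M balls out) := by unfold Spec_solution; infer_instance

-- ===== CLAIM (what is proved, stated in full; the proofs are below) =====
def Claim_equal_solution : Prop := ∀ (N : Int) (M : Int) (balls : List Int), Dom_solution N M balls → Pre_solution N M balls → Spec_solution N M balls (solution N M balls)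

-- ===== LEMMAS AND PROOFS =====

-- sum of c over an index list
def pvS (c : Int → Int) (l : List Int) : Int := (l.map c).sum

-- pvQ l = Σ_i c i * (c i + sum of c over the tail after i)
def pvQ (c : Int → Int) : List Int → Int
  | [] => 0
  | i :: l => c i * (c i + pvS c l) + pvQ c l

theorem pv_foldl_sum (c : Int → Int) (l : List Int) (a : Int) :
    l.foldl (fun s i => s + c i) a = a + pvS c l := by
  induction l generalizing a with
  | nil => simp [pvS]
  | cons i l ih =>
    simp only [List.foldl]
    rw [ih]
    simp [pvS]
    ring

theorem pv_loopA (c : Int → Int) (l : List Int) :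
    ∀ (N r : Int),
      (l.foldl (fun (st : Int × Int) i =>
          let n := st.1 - c i
          (n, st.2 + c i * n)) (N, r)).2
        = r + N * pvS c l - pvQ c l := by
  induction l with
  | nil => intro N r; simp [pvS, pvQ]
  | cons i l ih =>
    intro N r
    simp only [List.foldl, pvS, List.map, List.sum_cons, pvQ]
    rw [ih]
    show r + c i * (N - c i) + (N - c i) * pvS c l - pvQ c l = _
    simp [pvS]; ring

theorem pv_twoQ (c : Int → Int) (l : List Int) :
    2 * pvQ c l = pvS c l * pvS c l + pvS (fun i => c i * c i) l := by
  induction l with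
  | nil => simp [pvQ, pvS]
  | cons i l ih =>
    simp only [pvQ, pvS, List.map, List.sum_cons] at *
    ring_nf
    ring_nf at ih
    omega

-- ===== VERDICT (by name: the statement is the Claim_ definition above) =====
theorem solution_spec : Claim_equal_solution := by
  intro N M balls _ _
  unfold Spec_solution solution solution_alt
  set arr := pvCount balls
  set c : Int → Int := fun i => PySem.List.pyGetD arr i 0 with hc
  set l := PySem.List.pyRange 1 (M + 1) 1
  have hA := pv_loopA c l N 0
  have hP := pv_foldl_sum c l 0
  have hsq := pv_foldl_sum (fun i => c i * c i) l 0
  have h2 := pv_twoQ c l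
  simp only [zero_add] at hP hsq
  show (l.foldl (fun (st : Int × Int) i =>
          let n := st.1 - c i
          (n, st.2 + c i * n)) (N, 0)).2
      = PySem.Int.floordiv
          ((l.foldl (fun s i => s + c i) 0) * (l.foldl (fun s i => s + c i) 0) -
            l.foldl (fun s i => s + c i * c i) 0) 2
        + (l.foldl (fun s i => s + c i) 0) * (N - l.foldl (fun s i => s + c i) 0)
  rw [hA, hP, hsq]
  have hdiv : PySem.Int.floordiv (pvS c l * pvS c l - pvS (fun i => c i * c i) l) 2
      = pvQ c l - pvS (fun i => c i * c i) l := by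
    rw [PySem.Int.floordiv_eq_ediv_of_pos (by norm_num)]
    omega
  rw [hdiv]
  linarith [h2]
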